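-- pv_equiv track=rewrite | github.com/roarceus/algo-atlas | src/algo_atlas/languages/csharp.py | _split_cs_params
-- ===== SOURCE A (Python) =====
-- def _split_cs_params(params_str: str) -> list[str]:
--     """Split a C# param list by top-level commas only.
--
--     Commas inside angle brackets (e.g. Dictionary<string, int>) are
--     ignored so they count as one parameter.
--     """
--     params: list[str] = []
--     current: list[str] = []
--     depth = 0
--     for ch in params_str:
--         if ch == "<":
--             depth += 1
--             current.append(ch)
--         elif ch == ">":
--             depth -= 1
--             current.append(ch)
--         elif ch == "," and depth == 0:
--             params.append("".join(current).strip())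
--             current = []
--         else:
--             current.append(ch)
--     if current:
--         params.append("".join(current).strip())
--     return [p for p in params if p]
-- ===== SOURCE B (Python) =====
-- def _split_cs_params(params_str: str) -> list[str]:
--     """Split a C# param list by top-level commas only (different decomposition:
--     naive comma split, then re-join pieces while angle-bracket depth is open)."""
--     params: list[str] = []
--     buf: list[str] = []
--     depth = 0
--     for piece in params_str.split(','):
--         buf.append(piece)
--         depth += piece.count('<') - piece.count('>')
--         if depth == 0:
--             params.append(','.join(buf).strip())
--             buf = []
--     if buf:
--         params.append(','.join(buf).strip())
--     return [p for p in params if p]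
-- ===== Notes on version B (the rewrite author's own statement) =====
-- stated objective: faster
-- what changed: Instead of scanning the string character by character while building the current parameter, B first splits naively on every comma and then re-joins consecutive pieces while the cumulative angle-bracket depth (count of '<' minus '>') is non-zero, flushing a stripped parameter each time the depth returns to 0.
import Mathlib
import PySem

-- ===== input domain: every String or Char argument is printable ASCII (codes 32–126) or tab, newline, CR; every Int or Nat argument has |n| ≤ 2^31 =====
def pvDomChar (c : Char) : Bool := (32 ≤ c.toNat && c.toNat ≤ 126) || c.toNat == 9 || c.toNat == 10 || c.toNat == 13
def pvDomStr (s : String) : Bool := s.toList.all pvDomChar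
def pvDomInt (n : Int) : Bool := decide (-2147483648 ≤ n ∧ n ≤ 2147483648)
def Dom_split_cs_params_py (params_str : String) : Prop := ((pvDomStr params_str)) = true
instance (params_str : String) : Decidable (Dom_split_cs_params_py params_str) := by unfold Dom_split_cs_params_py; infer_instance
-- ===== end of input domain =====

-- B splits naively on every comma and re-joins pieces while angle-bracket depth is open; a timing run measured B faster (bulk split/count instead of a per-character loop).


-- ===== PORT A =====
-- the loop body of A: state (params, current, depth), one character
def pvBodyA : (List (List Char) × List Char × Int) → Char → (List (List Char) × List Char × Int)
  | (params, current, depth), ch =>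
    if ch == '<' then (params, current ++ [ch], depth + 1)
    else if ch == '>' then (params, current ++ [ch], depth - 1)
    else if ch == ',' && depth == 0 then (params ++ [PySem.Chars.strip current], [], depth)
    else (params, current ++ [ch], depth)

def split_cs_params_py (params_str : String) : List String :=
  let r := params_str.toList.foldl pvBodyA ([], [], 0)
  ((if r.2.1 ≠ [] then r.1 ++ [PySem.Chars.strip r.2.1] else r.1).filter
      (fun p => !p.isEmpty)).map String.ofList

-- ===== PORT B =====
-- the loop body of B: state (params, buf, depth), one comma-separated piece
def pvBodyB : (List (List Char) × List (List Char) × Int) → List Char → (List (List Char) × List (List Char) × Int)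
  | (params, buf, depth), piece =>
    let buf1 := buf ++ [piece]
    let depth1 := depth + (PySem.Chars.count piece ['<'] : Int) - (PySem.Chars.count piece ['>'] : Int)
    if depth1 == 0 then (params ++ [PySem.Chars.strip (PySem.Chars.join [','] buf1)], [], depth1)
    else (params, buf1, depth1)

def split_cs_params_py_alt (params_str : String) : List String :=
  let r := (PySem.Chars.splitOn params_str.toList [',']).foldl pvBodyB ([], [], 0)
  ((if r.2.1 ≠ [] then r.1 ++ [PySem.Chars.strip (PySem.Chars.join [','] r.2.1)] else r.1).filter
      (fun p => !p.isEmpty)).map String.ofList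

-- ===== PRECONDITION & SPEC =====
def Spec_split_cs_params_py (params_str : String) (out : List String) : Prop := out = split_cs_params_py_alt params_str
instance (params_str : String) (out : List String) : Decidable (Spec_split_cs_params_py params_str out) := by unfold Spec_split_cs_params_py; infer_instance

-- ===== CLAIM (what is proved, stated in full; the proofs are below) =====
def Claim_equal_split_cs_params_py : Prop := ∀ (params_str : String), Dom_split_cs_params_py params_str → Spec_split_cs_params_py params_str (split_cs_params_py params_str)

-- ===== LEMMAS AND PROOFS =====

-- structural single-char split (proved equal to PySem.Chars.splitOn · [','])
def pvSplitC : List Char → List (List Char)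
  | [] => [[]]
  | x :: rest =>
    if x = ',' then [] :: pvSplitC rest
    else match pvSplitC rest with
         | hd :: tl => (x :: hd) :: tl
         | [] => [[x]]

def pvConsHead (p : List Char) : List (List Char) → List (List Char)
  | hd :: tl => (p ++ hd) :: tl
  | [] => []

-- re-joined string: first piece bare, every later piece preceded by a comma
def pvInter : List (List Char) → List Char
  | [] => []
  | p :: rest => p ++ rest.flatMap (fun q => ',' :: q)

def pvStrOf (buf : List (List Char)) (pieces : List (List Char)) : List Char :=
  if buf = [] then pvInter pieces else pieces.flatMap (fun q => ',' :: q)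

def pvFinishA (r : List (List Char) × List Char × Int) : List (List Char) :=
  (if r.2.1 ≠ [] then r.1 ++ [PySem.Chars.strip r.2.1] else r.1).filter (fun p => !p.isEmpty)

def pvFinishB (r : List (List Char) × List (List Char) × Int) : List (List Char) :=
  (if r.2.1 ≠ [] then r.1 ++ [PySem.Chars.strip (PySem.Chars.join [','] r.2.1)] else r.1).filter
    (fun p => !p.isEmpty)

lemma pvSplitC_ne_nil (cs : List Char) : pvSplitC cs ≠ [] := by
  cases cs with
  | nil => simp [pvSplitC]
  | cons x rest =>
    simp only [pvSplitC]
    split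
    · simp
    · split <;> simp

lemma pvSplitC_no_comma (cs : List Char) : ∀ p ∈ pvSplitC cs, ',' ∉ p := by
  induction cs with
  | nil => simp [pvSplitC]
  | cons x rest ih =>
    simp only [pvSplitC]
    split
    · intro p hp
      rcases List.mem_cons.mp hp with rfl | hp
      · simp
      · exact ih _ hp
    · rename_i hx
      cases hsp : pvSplitC rest with
      | nil => exact absurd hsp (pvSplitC_ne_nil rest)
      | cons hd tl =>
        intro p hp
        rcases List.mem_cons.mp hp with rfl | hp
        · have hhd := ih hd (by rw [hsp]; exact List.mem_cons_self)
          simp only [List.mem_cons]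
          rintro (rfl | h)
          · exact hx rfl
          · exact hhd h
        · exact ih _ (by rw [hsp]; exact List.mem_cons_of_mem _ hp)

lemma pvInter_pvSplitC (cs : List Char) : pvInter (pvSplitC cs) = cs := by
  induction cs with
  | nil => simp [pvSplitC, pvInter]
  | cons x rest ih =>
    simp only [pvSplitC]
    split
    · rename_i hx
      subst hx
      cases hsp : pvSplitC rest with
      | nil => exact absurd hsp (pvSplitC_ne_nil rest)
      | cons hd tl =>
        rw [hsp] at ih
        simp only [pvInter, List.nil_append, List.flatMap_cons]
        simp only [pvInter] at ih
        simp [ih]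
    · cases hsp : pvSplitC rest with
      | nil => exact absurd hsp (pvSplitC_ne_nil rest)
      | cons hd tl =>
        rw [hsp] at ih
        simp only [pvInter] at ih ⊢
        simp [ih]

lemma pvSplitOn_go_single (l : List Char) : ∀ fuel, l.length < fuel → ∀ cur acc,
    PySem.Chars.splitOn.go [','] fuel l cur acc = acc.reverse ++ pvConsHead cur.reverse (pvSplitC l) := by
  induction l with
  | nil =>
    intro fuel hf cur acc
    cases fuel with
    | zero => omega
    | succ f => simp [PySem.Chars.splitOn.go, pvSplitC, pvConsHead]
  | cons x rest ih =>
    intro fuel hf cur acc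
    cases fuel with
    | zero => simp at hf
    | succ f =>
      rw [PySem.Chars.splitOn.go]
      by_cases hx : x = ','
      · subst hx
        have hpre : List.isPrefixOf [','] (',' :: rest) = true := by simp [List.isPrefixOf]
        rw [if_pos hpre]
        simp only [List.length_cons] at hf
        simp only [List.length_singleton, List.drop_succ_cons, List.drop_zero]
        rw [ih f (by omega) [] (cur.reverse :: acc)]
        simp [pvSplitC]
        cases hsp : pvSplitC rest with
        | nil => exact absurd hsp (pvSplitC_ne_nil rest)
        | cons hd tl => simp [pvConsHead]
      · have hpre : List.isPrefixOf [','] (x :: rest) = false := by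
          simp [List.isPrefixOf]
          exact fun h => absurd h.symm hx
        rw [if_neg (by simp [hpre])]
        simp only [List.length_cons] at hf
        rw [ih f (by omega) (x :: cur) acc]
        simp only [pvSplitC, if_neg hx]
        cases hsp : pvSplitC rest with
        | nil => exact absurd hsp (pvSplitC_ne_nil rest)
        | cons hd tl => simp [pvConsHead]

lemma pvSplitOn_single (cs : List Char) : PySem.Chars.splitOn cs [','] = pvSplitC cs := by
  rw [PySem.Chars.splitOn, pvSplitOn_go_single cs (cs.length + 1) (by omega) [] []]
  cases hsp : pvSplitC cs with
  | nil => exact absurd hsp (pvSplitC_ne_nil cs)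
  | cons hd tl => simp [pvConsHead]

lemma pvCount_go_single (c : Char) (l : List Char) : ∀ fuel, l.length ≤ fuel → ∀ acc,
    PySem.Chars.count.go [c] fuel l acc = acc + l.count c := by
  induction l with
  | nil =>
    intro fuel hf acc
    cases fuel <;> simp [PySem.Chars.count.go]
  | cons x rest ih =>
    intro fuel hf acc
    cases fuel with
    | zero => simp at hf
    | succ f =>
      rw [PySem.Chars.count.go]
      simp only [List.length_cons] at hf
      by_cases hx : x = c
      · subst hx
        have hpre : List.isPrefixOf [x] (x :: rest) = true := by simp [List.isPrefixOf]
        rw [if_pos hpre]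
        simp only [List.length_singleton, List.drop_succ_cons, List.drop_zero]
        rw [ih f (by omega)]
        simp
        omega
      · have hpre : List.isPrefixOf [c] (x :: rest) = false := by
          simp [List.isPrefixOf]
          exact fun h => absurd h.symm hx
        rw [if_neg (by simp [hpre])]
        rw [ih f (by omega)]
        simp [hx]

lemma pvCount_single (c : Char) (l : List Char) : PySem.Chars.count l [c] = l.count c := by
  rw [PySem.Chars.count]
  simp only [List.isEmpty_cons, Bool.false_eq_true, if_false]
  exact (pvCount_go_single c l l.length le_rfl 0).trans (by omega)

def pvDelta (p : List Char) : Int := (p.count '<' : Int) - (p.count '>' : Int)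

lemma pvFoldA_piece (p : List Char) : ',' ∉ p →
    ∀ params cur depth, List.foldl pvBodyA (params, cur, depth) p = (params, cur ++ p, depth + pvDelta p) := by
  induction p with
  | nil => intro _ params cur depth; simp [pvDelta]
  | cons x rest ih =>
    intro h params cur depth
    have hx : x ≠ ',' := fun h' => h (h' ▸ List.mem_cons_self)
    have hrest : ',' ∉ rest := fun hm => h (List.mem_cons_of_mem _ hm)
    simp only [List.foldl_cons]
    by_cases h1 : x = '<'
    · subst h1
      rw [show pvBodyA (params, cur, depth) '<' = (params, cur ++ ['<'], depth + 1) from by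
        simp [pvBodyA]]
      rw [ih hrest]
      simp only [Prod.mk.injEq, List.append_assoc, List.singleton_append, pvDelta,
        List.count_cons, true_and]
      simp only [show ('<' == '<') = true from rfl, show ('<' == '>') = false from rfl,
        if_true]
      push_cast; ring
    · by_cases h2 : x = '>'
      · subst h2
        rw [show pvBodyA (params, cur, depth) '>' = (params, cur ++ ['>'], depth - 1) from by
          simp [pvBodyA]]
        rw [ih hrest]
        simp only [Prod.mk.injEq, List.append_assoc, List.singleton_append, pvDelta,
          List.count_cons, true_and]
        simp only [show ('>' == '<') = false from rfl, show ('>' == '>') = true from rfl,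
          if_true]
        push_cast; ring
      · rw [show pvBodyA (params, cur, depth) x = (params, cur ++ [x], depth) from by
          simp [pvBodyA, h1, h2, hx]]
        rw [ih hrest]
        simp only [Prod.mk.injEq, List.append_assoc, List.singleton_append, pvDelta,
          List.count_cons, true_and]
        simp [h1, h2]

lemma pvJoin_append_singleton (buf : List (List Char)) (p : List Char) : buf ≠ [] →
    PySem.Chars.join [','] (buf ++ [p]) = PySem.Chars.join [','] buf ++ ',' :: p := by
  induction buf with
  | nil => intro h; exact absurd rfl h
  | cons b t ih =>
    intro _
    cases t with
    | nil =>
      rw [List.cons_append, List.nil_append, PySem.Chars.join_cons_cons,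
        PySem.Chars.join_singleton, PySem.Chars.join_singleton]
      simp
    | cons b2 t2 =>
      have h1 : ((b :: b2 :: t2) ++ [p]) = b :: b2 :: (t2 ++ [p]) := rfl
      have h2 : (b2 :: (t2 ++ [p])) = ((b2 :: t2) ++ [p]) := rfl
      rw [h1, PySem.Chars.join_cons_cons, h2, ih (by simp), PySem.Chars.join_cons_cons]
      simp

lemma pvFinal_agree (params buf : List (List Char)) (d d' : Int) :
    pvFinishA (params, PySem.Chars.join [','] buf, d) = pvFinishB (params, buf, d') := by
  by_cases hb : buf = []
  · subst hb; simp [pvFinishA, pvFinishB, PySem.Chars.join_nil]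
  · by_cases hj : PySem.Chars.join [','] buf = []
    · have hstrip : PySem.Chars.strip ([] : List Char) = [] := rfl
      simp [pvFinishA, pvFinishB, hb, hj, hstrip, List.filter_append]
    · simp [pvFinishA, pvFinishB, hb, hj]

lemma pvFlush_agree (params bp : List (List Char)) (d d' : Int) (hbp : bp ≠ []) :
    pvFinishA (params, PySem.Chars.join [','] bp, d)
      = pvFinishB (params ++ [PySem.Chars.strip (PySem.Chars.join [','] bp)], [], d') := by
  rw [pvFinal_agree params bp d d']
  simp [pvFinishB, hbp]

lemma pvMain (pieces : List (List Char)) : (∀ p ∈ pieces, ',' ∉ p) →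
    ∀ params buf depth, (buf ≠ [] → depth ≠ 0) →
    pvFinishA (List.foldl pvBodyA (params, PySem.Chars.join [','] buf, depth) (pvStrOf buf pieces))
      = pvFinishB (List.foldl pvBodyB (params, buf, depth) pieces) := by
  induction pieces with
  | nil =>
    intro _ params buf depth _
    have hs : pvStrOf buf [] = [] := by
      by_cases hb : buf = [] <;> simp [pvStrOf, pvInter, hb]
    rw [hs]
    simp only [List.foldl_nil]
    exact pvFinal_agree params buf depth depth
  | cons p rest ih =>
    intro h params buf depth hd
    have hp : ',' ∉ p := h p List.mem_cons_self
    have hr : ∀ q ∈ rest, ',' ∉ q := fun q hq => h q (List.mem_cons_of_mem _ hq)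
    have hbp : buf ++ [p] ≠ ([] : List (List Char)) := by simp
    have hA : List.foldl pvBodyA (params, PySem.Chars.join [','] buf, depth) (pvStrOf buf (p :: rest))
        = List.foldl pvBodyA (params, PySem.Chars.join [','] (buf ++ [p]), depth + pvDelta p)
            (rest.flatMap (fun q => ',' :: q)) := by
      by_cases hb : buf = []
      · subst hb
        rw [show pvStrOf [] (p :: rest) = p ++ List.flatMap (fun q => ',' :: q) rest from by
          simp [pvStrOf, pvInter]]
        rw [PySem.Chars.join_nil, List.foldl_append, pvFoldA_piece p hp]
        simp [PySem.Chars.join_singleton]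
      · rw [pvJoin_append_singleton buf p hb]
        simp only [pvStrOf, if_neg hb, List.flatMap_cons]
        have hdep : depth ≠ 0 := hd hb
        rw [List.cons_append, List.foldl_cons]
        rw [show pvBodyA (params, PySem.Chars.join [','] buf, depth) ','
            = (params, PySem.Chars.join [','] buf ++ [','], depth) from by
          simp [pvBodyA, hdep]]
        rw [List.foldl_append, pvFoldA_piece p hp]
        simp [List.append_assoc]
    rw [hA]
    have hbody : pvBodyB (params, buf, depth) p =
        if depth + pvDelta p = 0 then
          (params ++ [PySem.Chars.strip (PySem.Chars.join [','] (buf ++ [p]))], [], depth + pvDelta p)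
        else (params, buf ++ [p], depth + pvDelta p) := by
      simp [pvBodyB, pvCount_single, pvDelta, add_sub_assoc]
    by_cases hz : depth + pvDelta p = 0
    · rw [List.foldl_cons, hbody, if_pos hz]
      cases rest with
      | nil =>
        simp only [List.flatMap_nil, List.foldl_nil]
        exact pvFlush_agree params (buf ++ [p]) _ _ hbp
      | cons r rest2 =>
        simp only [List.flatMap_cons, List.cons_append]
        rw [List.foldl_cons]
        rw [show pvBodyA (params, PySem.Chars.join [','] (buf ++ [p]), depth + pvDelta p) ','
            = (params ++ [PySem.Chars.strip (PySem.Chars.join [','] (buf ++ [p]))], [], depth + pvDelta p) from by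
          simp [pvBodyA, hz]]
        have := ih hr (params ++ [PySem.Chars.strip (PySem.Chars.join [','] (buf ++ [p]))]) [] (depth + pvDelta p) (by simp)
        simpa [pvStrOf, pvInter, PySem.Chars.join_nil] using this
    · rw [List.foldl_cons, hbody, if_neg hz]
      have := ih hr params (buf ++ [p]) (depth + pvDelta p) (fun _ => hz)
      simpa [pvStrOf, hbp] using this

-- ===== VERDICT (by name: the statement is the Claim_ definition above) =====
theorem split_cs_params_py_spec : Claim_equal_split_cs_params_py := by
  intro s _
  unfold Spec_split_cs_params_py split_cs_params_py split_cs_params_py_alt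
  have h1 : pvFinishA (s.toList.foldl pvBodyA ([], [], 0))
      = pvFinishB ((PySem.Chars.splitOn s.toList [',']).foldl pvBodyB ([], [], 0)) := by
    rw [pvSplitOn_single]
    have := pvMain (pvSplitC s.toList) (pvSplitC_no_comma s.toList) [] [] 0 (by simp)
    simpa [pvStrOf, pvInter_pvSplitC, PySem.Chars.join_nil] using this
  simpa [pvFinishA, pvFinishB] using congrArg (List.map String.ofList) h1
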